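-- pv_equiv track=rewrite | github.com/AcruxTech/mothafuckabot | app/services/misc_functions.py | to_fence_font
-- ===== SOURCE A (Python) =====
-- def to_fence_font(seq: str) -> str:
--     seq = list(seq.lower())
--     for i, symbol in enumerate(seq):
--         if not symbol.isalpha():
--             continue
--         if sum(map(str.isalpha, seq[:i])) % 2 == 0:
--             seq[i] = symbol.upper()
--
--     return ''.join(seq)
-- ===== SOURCE B (Python) =====
-- def to_fence_font(seq: str) -> str:
--     out = []
--     k = 0
--     for ch in seq.lower():
--         if ch.isalpha():
--             out.append(ch.upper() if k % 2 == 0 else ch)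
--             k += 1
--         else:
--             out.append(ch)
--     return ''.join(out)
-- ===== Notes on version B (the rewrite author's own statement) =====
-- stated objective: faster
-- what changed: Replaces A's per-character recount of alphabetic characters in the whole prefix (seq[:i]) with a single pass that threads a running counter of alphabetic characters seen so far.
import Mathlib
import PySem

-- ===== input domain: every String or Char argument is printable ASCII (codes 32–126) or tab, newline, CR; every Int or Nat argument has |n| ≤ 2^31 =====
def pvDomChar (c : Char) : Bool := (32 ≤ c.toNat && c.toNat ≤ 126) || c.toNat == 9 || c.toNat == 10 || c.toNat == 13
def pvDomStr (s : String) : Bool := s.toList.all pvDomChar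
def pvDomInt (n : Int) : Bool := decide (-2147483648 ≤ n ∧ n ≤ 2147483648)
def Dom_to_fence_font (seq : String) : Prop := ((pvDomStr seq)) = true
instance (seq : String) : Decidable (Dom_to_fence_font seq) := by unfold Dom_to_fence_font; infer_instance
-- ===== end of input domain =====

-- B replaces A's quadratic per-character recount of alphabetic prefix characters by one
-- pass with a running counter (objective: faster; return value only, A mutates no argument).


-- ===== PORT A =====
-- one loop iteration of A: symbol = seq[i]; skip non-alpha; uppercase in place when the
-- count of alphabetic chars in seq[:i] is even (sum(map(isalpha, …)) ported as countP)
def fenceStepA (s : List Char) (i : Nat) : List Char :=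
  let symbol := s.getD i ' '
  if PySem.Chars.isalpha symbol = false then s
  else if (PySem.List.slice s none (some (i : Int))).countP PySem.Chars.isalpha % 2 = 0 then
    s.set i (PySem.Chars.upperChar symbol)
  else s

-- 'for i, symbol in enumerate(seq)' over the mutating list, as an index loop over the live
-- state (faithful: only already-visited indices are ever modified)
def to_fence_font (seq : String) : String :=
  let s0 := PySem.Chars.lower seq.toList
  String.ofList ((List.range s0.length).foldl fenceStepA s0)

-- ===== PORT B =====
-- Source B's loop: cons the transformed char, thread the running alpha counter k
def fenceGo : List Char → Nat → List Char
  | [], _ => []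
  | c :: cs, k =>
    if PySem.Chars.isalpha c then
      (if k % 2 = 0 then PySem.Chars.upperChar c else c) :: fenceGo cs (k + 1)
    else c :: fenceGo cs k

def to_fence_font_alt (seq : String) : String :=
  String.ofList (fenceGo (PySem.Chars.lower seq.toList) 0)

-- ===== PRECONDITION & SPEC =====
def Spec_to_fence_font (seq : String) (out : String) : Prop := out = to_fence_font_alt seq
instance (seq : String) (out : String) : Decidable (Spec_to_fence_font seq out) := by unfold Spec_to_fence_font; infer_instance

-- ===== CLAIM (what is proved, stated in full; the proofs are below) =====
def Claim_equal_to_fence_font : Prop := ∀ (seq : String), Dom_to_fence_font seq → Spec_to_fence_font seq (to_fence_font seq)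

-- ===== LEMMAS AND PROOFS =====

theorem isalpha_upperChar (c : Char) :
    PySem.Chars.isalpha (PySem.Chars.upperChar c) = PySem.Chars.isalpha c := by
  simp only [PySem.Chars.isalpha, PySem.Chars.upperChar, PySem.Chars.islower, PySem.Chars.isupper]
  split_ifs with h
  · rw [Bool.and_eq_true, decide_eq_true_eq, decide_eq_true_eq] at h
    obtain ⟨h1, h2⟩ := h
    rw [Char.le_def, UInt32.le_iff_toNat_le] at h1 h2
    have hval : Nat.isValidChar (c.toNat - 32) := Or.inl (by
      have : c.val.toNat ≤ 122 := by simpa using h2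
      simp only [Char.toNat]; omega)
    have hv : (Char.ofNat (c.toNat - 32)).val.toNat = c.toNat - 32 := by
      show (Char.ofNat (c.toNat - 32)).toNat = _
      rw [Char.toNat_ofNat, if_pos hval]
    apply Bool.eq_iff_iff.mpr
    simp only [Bool.or_eq_true, Bool.and_eq_true, decide_eq_true_eq, Char.le_def,
      UInt32.le_iff_toNat_le, hv]
    have a1 : ('A'.val.toNat = 65) := by decide
    have a2 : ('Z'.val.toNat = 90) := by decide
    have a3 : ('a'.val.toNat = 97) := by decide
    have a4 : ('z'.val.toNat = 122) := by decide
    simp only [a1, a2, a3, a4] at *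
    simp only [Char.toNat] at *
    omega
  · rfl

theorem getD_append_length (pre : List Char) (c : Char) (cs : List Char) (d : Char) :
    (pre ++ c :: cs).getD pre.length d = c := by
  simp [List.getD]

theorem set_append_length (pre : List Char) (c x : Char) (cs : List Char) :
    (pre ++ c :: cs).set pre.length x = pre ++ x :: cs := by
  rw [List.set_append]
  simp

theorem slice_take_pre (pre suf : List Char) :
    PySem.List.slice (pre ++ suf) none (some (pre.length : Int)) = pre := by
  rw [PySem.List.slice_to]
  · simp
  · positivity

-- A's loop over indices pre.length … pre.length+suf.length-1, started on pre ++ suf,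
-- leaves pre untouched and computes fenceGo on suf with the alpha-count of pre as counter
theorem loopA (suf : List Char) : ∀ (pre : List Char),
    (List.range' pre.length suf.length).foldl fenceStepA (pre ++ suf)
      = pre ++ fenceGo suf (pre.countP PySem.Chars.isalpha) := by
  induction suf with
  | nil => intro pre; simp [fenceGo]
  | cons c cs ih =>
    intro pre
    rw [List.length_cons, List.range'_succ, List.foldl_cons]
    have hstep : fenceStepA (pre ++ c :: cs) pre.length =
        if PySem.Chars.isalpha c = false then pre ++ c :: cs
        else if pre.countP PySem.Chars.isalpha % 2 = 0 then
          pre ++ PySem.Chars.upperChar c :: cs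
        else pre ++ c :: cs := by
      unfold fenceStepA
      simp only [getD_append_length, slice_take_pre, set_append_length]
    by_cases ha : PySem.Chars.isalpha c = true
    · rw [hstep]
      simp only [ha, Bool.true_eq_false, if_false, fenceGo]
      by_cases hp : pre.countP PySem.Chars.isalpha % 2 = 0
      · rw [if_pos hp, if_pos hp]
        have h1 : pre.length + 1 = (pre ++ [PySem.Chars.upperChar c]).length := by simp
        have h2 : pre ++ PySem.Chars.upperChar c :: cs
            = (pre ++ [PySem.Chars.upperChar c]) ++ cs := by simp
        rw [h1, h2, ih]
        simp [List.countP_append, isalpha_upperChar, ha]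
      · rw [if_neg hp, if_neg hp]
        have h1 : pre.length + 1 = (pre ++ [c]).length := by simp
        have h2 : pre ++ c :: cs = (pre ++ [c]) ++ cs := by simp
        rw [h1, h2, ih]
        simp [List.countP_append, ha]
    · rw [hstep]
      rw [Bool.not_eq_true] at ha
      simp only [ha, if_true]
      have h1 : pre.length + 1 = (pre ++ [c]).length := by simp
      have h2 : pre ++ c :: cs = (pre ++ [c]) ++ cs := by simp
      rw [h1, h2, ih]
      simp [fenceGo, List.countP_append, ha]

-- ===== VERDICT (by name: the statement is the Claim_ definition above) =====
theorem to_fence_font_spec : Claim_equal_to_fence_font := by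
  intro seq _
  unfold Spec_to_fence_font to_fence_font to_fence_font_alt
  have h := loopA (PySem.Chars.lower seq.toList) []
  simp only [List.length_nil, List.nil_append, List.countP_nil] at h
  show String.ofList (List.foldl fenceStepA _ (List.range _)) = _
  rw [List.range_eq_range', h]
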